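-- pv_equiv track=rewrite | github.com/msadizc/school-assignments | signals and systems/hw1/20011037.py | myConv
-- ===== SOURCE A (Python) =====
-- def myConv(x,n,y,m): #Bu fonksiyonda konvolüsyon işlemi formülüne bağlı kalarak gerçeklenmiştir.
--     sonuc = []
--     for i in range(n+m-1):
--         sum = 0
--         for k in range(max(0,i-m+1),min(n,i+1)):
--             sum += int(x[k]) * int(y[i - k])
--         sonuc.append(sum)
--     return sonuc
-- ===== SOURCE B (Python) =====
-- def myConv(x, n, y, m):
--     # scatter (outer-product accumulation) convolution instead of per-output gather
--     xs = x[:max(0, n)]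
--     ys = y[:max(0, m)]
--     out = [0] * max(0, n + m - 1)
--     for i, xi in enumerate(xs):
--         for j, yj in enumerate(ys):
--             out[i + j] += xi * yj
--     return out
-- ===== Notes on version B (the rewrite author's own statement) =====
-- stated objective: alternative
-- what changed: B replaces A's per-output gather (for each output index, sum x[k]*y[i-k] over a clamped k-window) by a scatter/outer-product accumulation: it truncates x,y to the stated lengths, allocates a zero output of length n+m-1 and adds x[i]*y[j] into slot i+j for every input pair.
import Mathlib
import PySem

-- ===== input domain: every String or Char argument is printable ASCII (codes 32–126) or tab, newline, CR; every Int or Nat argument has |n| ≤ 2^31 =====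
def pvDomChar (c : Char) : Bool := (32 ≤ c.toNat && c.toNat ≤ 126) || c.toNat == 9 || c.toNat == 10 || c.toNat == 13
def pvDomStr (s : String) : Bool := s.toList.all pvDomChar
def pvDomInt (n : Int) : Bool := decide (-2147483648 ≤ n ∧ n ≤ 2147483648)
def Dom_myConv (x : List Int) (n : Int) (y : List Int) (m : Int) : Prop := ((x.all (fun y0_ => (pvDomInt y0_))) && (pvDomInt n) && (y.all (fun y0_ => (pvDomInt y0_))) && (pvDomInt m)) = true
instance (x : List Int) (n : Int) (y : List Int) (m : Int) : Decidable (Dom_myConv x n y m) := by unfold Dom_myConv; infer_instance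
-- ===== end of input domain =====

-- B computes the same discrete convolution by scatter (outer-product accumulation) instead of A's
-- per-output gather; same O(n*m) cost, genuinely different traversal (objective: alternative).

-- ===== PORT A =====
def myConv (x : List Int) (n : Int) (y : List Int) (m : Int) : List Int :=
  (PySem.List.pyRange 0 (n + m - 1) 1).foldl
    (fun sonuc i =>
      sonuc ++ [(PySem.List.pyRange (max 0 (i - m + 1)) (min n (i + 1)) 1).foldl
        (fun s k => s + PySem.List.pyGetD x k 0 * PySem.List.pyGetD y (i - k) 0) 0])
    []

-- ===== PORT B =====
def myConv_alt (x : List Int) (n : Int) (y : List Int) (m : Int) : List Int :=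
  let xs := PySem.List.slice x none (some (max 0 n))
  let ys := PySem.List.slice y none (some (max 0 m))
  let out0 := List.replicate (n + m - 1).toNat (0 : Int)
  (PySem.List.enumerate xs 0).foldl
    (fun out pi =>
      (PySem.List.enumerate ys 0).foldl
        (fun out pj =>
          out.set (pi.1 + pj.1).toNat (out.getD (pi.1 + pj.1).toNat 0 + pi.2 * pj.2))
        out)
    out0

-- ===== PRECONDITION & SPEC =====
-- Pre_ excludes exactly the inputs on which A raises IndexError (0 < n and 0 < m but
-- n > len(x) or m > len(y)); on every other input A returns normally.
def Pre_myConv (x : List Int) (n : Int) (y : List Int) (m : Int) : Prop :=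
  n ≤ 0 ∨ m ≤ 0 ∨ (n ≤ (x.length : Int) ∧ m ≤ (y.length : Int))
instance (x : List Int) (n : Int) (y : List Int) (m : Int) : Decidable (Pre_myConv x n y m) := by
  unfold Pre_myConv; infer_instance

def pvWitness_myConv : List Int × Int × List Int × Int := ([1, 2], 2, [3, 4, 5], 3)

def Spec_myConv (x : List Int) (n : Int) (y : List Int) (m : Int) (out : List Int) : Prop := out = myConv_alt x n y m
instance (x : List Int) (n : Int) (y : List Int) (m : Int) (out : List Int) : Decidable (Spec_myConv x n y m out) := by unfold Spec_myConv; infer_instance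

-- ===== CLAIM (what is proved, stated in full; the proofs are below) =====
def Claim_equal_myConv : Prop := ∀ (x : List Int) (n : Int) (y : List Int) (m : Int), Dom_myConv x n y m → Pre_myConv x n y m → Spec_myConv x n y m (myConv x n y m)

-- ===== LEMMAS AND PROOFS =====

-- value of ys at offset q - base, zero outside
def pvYval (ys : List Int) (base q : Nat) : Int :=
  if h : base ≤ q ∧ q - base < ys.length then ys[q - base]'h.2 else 0

-- total contribution of the scatter pass of xs (indexed from base) to output slot q
def pvContrib : List Int → List Int → Nat → Nat → Int
  | [], _, _, _ => 0
  | xi :: xs', ys, base, q => xi * pvYval ys base q + pvContrib xs' ys (base + 1) q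

lemma pvYval_nil (base q : Nat) : pvYval [] base q = 0 := by
  simp [pvYval]

lemma pvContrib_ys_nil (xs : List Int) (base q : Nat) : pvContrib xs [] base q = 0 := by
  induction xs generalizing base with
  | nil => rfl
  | cons xi xs' ih => simp [pvContrib, pvYval_nil, ih]

lemma pvInner_fold (xi i : Int) (hi : 0 ≤ i) (q : Nat) :
    ∀ (ys : List Int) (s : Int), 0 ≤ s → ∀ (out : List Int),
    ((PySem.List.enumerate ys s).foldl
        (fun out pj => out.set (i + pj.1).toNat (out.getD (i + pj.1).toNat 0 + xi * pj.2)) out)[q]?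
      = (out[q]?).map (fun v => v + xi * pvYval ys (i + s).toNat q) := by
  intro ys
  induction ys with
  | nil =>
      intro s hs out
      simp [PySem.List.enumerate_nil, pvYval_nil]
  | cons yj ys' ih =>
      intro s hs out
      rw [PySem.List.enumerate_cons]
      simp only [List.foldl_cons]
      rw [ih (s + 1) (by omega)]
      set b := (i + s).toNat with hb
      have hb1 : (i + (s + 1)).toNat = b + 1 := by omega
      rw [hb1]
      by_cases hq : q = b
      · subst hq
        have hy1 : pvYval ys' (b + 1) b = 0 := by simp [pvYval]
        have hy2 : pvYval (yj :: ys') b b = yj := by simp [pvYval]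
        by_cases hlen : b < out.length
        · have h1 : (out.set b (out.getD b 0 + xi * yj))[b]? = some (out.getD b 0 + xi * yj) := by
            simp [hlen]
          have hgd : out.getD b 0 = out[b] := List.getD_eq_getElem out 0 hlen
          have h2 : out[b]? = some out[b] := List.getElem?_eq_getElem hlen
          rw [h1, h2]
          simp [hy1, hy2, h2]
        · have h1 : (out.set b (out.getD b 0 + xi * yj))[b]? = none := by
            simp [hlen]
          have h2 : out[b]? = none := by
            rw [List.getElem?_eq_none_iff]; omega
          rw [h1, h2]; simp
      · have hset : (out.set b (out.getD b 0 + xi * yj))[q]? = out[q]? := by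
          simp [Ne.symm hq]
        rw [hset]
        have hyy : pvYval ys' (b + 1) q = pvYval (yj :: ys') b q := by
          unfold pvYval
          by_cases hc : b + 1 ≤ q ∧ q - (b + 1) < ys'.length
          · have hc' : b ≤ q ∧ q - b < (yj :: ys').length := by
              constructor <;> [omega; (simp; omega)]
            rw [dif_pos hc, dif_pos hc']
            have hqb : q - b = (q - (b + 1)) + 1 := by omega
            simp [hqb]
          · have hc' : ¬ (b ≤ q ∧ q - b < (yj :: ys').length) := by
              simp only [List.length_cons]; omega
            rw [dif_neg hc, dif_neg hc']
        rw [hyy]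

lemma pvOuter_fold (ys : List Int) (q : Nat) :
    ∀ (xs : List Int) (s : Int), 0 ≤ s → ∀ (out : List Int),
    ((PySem.List.enumerate xs s).foldl
        (fun out pi => (PySem.List.enumerate ys 0).foldl
          (fun out pj => out.set (pi.1 + pj.1).toNat (out.getD (pi.1 + pj.1).toNat 0 + pi.2 * pj.2)) out)
        out)[q]?
      = (out[q]?).map (fun v => v + pvContrib xs ys s.toNat q) := by
  intro xs
  induction xs with
  | nil =>
      intro s hs out
      simp [PySem.List.enumerate_nil, pvContrib]
  | cons xi xs' ih =>
      intro s hs out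
      rw [PySem.List.enumerate_cons]
      simp only [List.foldl_cons]
      rw [ih (s + 1) (by omega)]
      rw [pvInner_fold xi s hs q ys 0 (by omega)]
      have h1 : (s + 1).toNat = s.toNat + 1 := by omega
      have h0 : (s + 0).toNat = s.toNat := by omega
      rw [h0, h1]
      cases out[q]? with
      | none => rfl
      | some v => simp [pvContrib]; ring

lemma pvSum_map_range (c : Nat) (g : Nat → Int) :
    ((List.range c).map g).sum = ∑ i ∈ Finset.range c, g i := by
  induction c with
  | zero => simp
  | succ c ih => rw [List.range_succ, Finset.sum_range_succ]; simp [ih]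

lemma pvContrib_eq_sum (ys : List Int) (q : Nat) :
    ∀ (xs : List Int) (base : Nat),
    pvContrib xs ys base q = ∑ k ∈ Finset.range xs.length, xs.getD k 0 * pvYval ys (base + k) q := by
  intro xs
  induction xs with
  | nil => intro base; simp [pvContrib]
  | cons xi xs' ih =>
      intro base
      rw [pvContrib, ih (base + 1)]
      rw [List.length_cons, Finset.sum_range_succ']
      simp only [List.getD_cons_succ, List.getD_cons_zero, Nat.add_zero]
      have hco : (∑ k ∈ Finset.range xs'.length, xs'.getD k 0 * pvYval ys (base + (k + 1)) q)
          = ∑ k ∈ Finset.range xs'.length, xs'.getD k 0 * pvYval ys (base + 1 + k) q := by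
        apply Finset.sum_congr rfl
        intro k _
        have hbk : base + (k + 1) = base + 1 + k := by omega
        rw [hbk]
      rw [hco]
      ring

lemma pvInnerSum_eq (x y : List Int) (n m : Int) (q : Nat)
    (hn : 0 < n) (hm : 0 < m) (hnx : n ≤ (x.length : Int)) (hmy : m ≤ (y.length : Int))
    (hq : (q : Int) < n + m - 1) :
    (PySem.List.pyRange (max 0 ((q : Int) - m + 1)) (min n ((q : Int) + 1)) 1).foldl
      (fun s k => s + PySem.List.pyGetD x k 0 * PySem.List.pyGetD y ((q : Int) - k) 0) 0
      = pvContrib (x.take n.toNat) (y.take m.toNat) 0 q := by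
  set a : Int := max 0 ((q : Int) - m + 1) with ha
  set b : Int := min n ((q : Int) + 1) with hb
  have ha0 : 0 ≤ a := by omega
  have hab : a ≤ b := by omega
  set A' : Nat := a.toNat with hA
  set B' : Nat := b.toNat with hB
  set N : Nat := n.toNat with hN
  set M : Nat := m.toNat with hM
  have hBN : B' ≤ N := by omega
  have hNx : N ≤ x.length := by omega
  have hMy : M ≤ y.length := by omega
  rw [PySem.List.foldl_add, PySem.List.pyRange_one, List.map_map, pvSum_map_range, zero_add]
  rw [pvContrib_eq_sum]
  -- RHS: restrict the range-N sum to Ico A' B' (terms outside vanish)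
  have hxs_len : (x.take N).length = N := by rw [List.length_take]; omega
  have hys_len : (y.take M).length = M := by rw [List.length_take]; omega
  rw [hxs_len]
  have hsub : Finset.Ico A' B' ⊆ Finset.range N := by
    intro k hk
    simp only [Finset.mem_Ico] at hk
    simp only [Finset.mem_range]
    omega
  have hzero : ∀ k ∈ Finset.range N, k ∉ Finset.Ico A' B' →
      (x.take N).getD k 0 * pvYval (y.take M) (0 + k) q = 0 := by
    intro k hkr hknot
    simp only [Finset.mem_range] at hkr
    simp only [Finset.mem_Ico, not_and_or, not_le, not_lt] at hknot
    have : pvYval (y.take M) (0 + k) q = 0 := by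
      unfold pvYval
      rw [dif_neg]
      rw [hys_len]
      simp only [Nat.zero_add]
      omega
    rw [this, mul_zero]
  rw [← Finset.sum_subset hsub hzero, Finset.sum_Ico_eq_sum_range]
  have hcnt : (b - a).toNat = B' - A' := by omega
  rw [hcnt]
  apply Finset.sum_congr rfl
  intro i hi
  simp only [Finset.mem_range] at hi
  simp only [Function.comp_apply]
  have hk : A' + i < B' := by omega
  -- index facts
  have hklt : A' + i < N := by omega
  have hkq : A' + i ≤ q := by omega
  have hyidx : q - (A' + i) < M := by omega
  have hgx : (x.take N).getD (A' + i) 0 = x[A' + i]'(by omega) := by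
    rw [List.getD_eq_getElem _ _ (by omega : A' + i < (x.take N).length)]
    simp [List.getElem_take]
  have hgy : pvYval (y.take M) (0 + (A' + i)) q = y[q - (A' + i)]'(by omega) := by
    unfold pvYval
    rw [dif_pos (by rw [hys_len]; constructor <;> omega)]
    simp [List.getElem_take]
  rw [hgx, hgy]
  -- LHS term
  have haI : a + (i : Int) = ((A' + i : Nat) : Int) := by push_cast; omega
  rw [haI]
  have hpx : PySem.List.pyGetD x ((A' + i : Nat) : Int) 0 = x[A' + i]'(by omega) := by
    rw [PySem.List.pyGetD_eq_getElem x 0 (by positivity) (by push_cast; omega)]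
    congr 1
  have hpy : PySem.List.pyGetD y ((q : Int) - ((A' + i : Nat) : Int)) 0 = y[q - (A' + i)]'(by omega) := by
    have h0 : (0 : Int) ≤ (q : Int) - ((A' + i : Nat) : Int) := by push_cast; omega
    have h1 : (q : Int) - ((A' + i : Nat) : Int) < (y.length : Int) := by push_cast; omega
    rw [PySem.List.pyGetD_eq_getElem y 0 h0 h1]
    have hidx : ((q : Int) - ((A' + i : Nat) : Int)).toNat = q - (A' + i) := by omega
    simp only [hidx]
  rw [hpx, hpy]

-- ===== VERDICT (by name: the statement is the Claim_ definition above) =====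
theorem myConv_spec : Claim_equal_myConv := by
  intro x n y m _ hpre
  unfold Spec_myConv
  unfold myConv myConv_alt
  rw [PySem.List.foldl_append_singleton_eq_map, List.nil_append]
  simp only []
  have hmax0 : ∀ t : Int, 0 ≤ max 0 t := fun t => le_max_left 0 t
  rw [PySem.List.slice_to x (hmax0 n), PySem.List.slice_to y (hmax0 m)]
  have hxn : (max 0 n).toNat = n.toNat := by omega
  have hym : (max 0 m).toNat = m.toNat := by omega
  rw [hxn, hym]
  set L : Nat := (n + m - 1).toNat with hL
  apply List.ext_getElem?
  intro q
  rw [pvOuter_fold _ q _ 0 (by omega)]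
  rw [PySem.List.pyRange_one, List.map_map]
  rw [List.getElem?_map, List.getElem?_replicate]
  by_cases hqL : q < L
  · rw [List.getElem?_range (show q < (n + m - 1 - 0).toNat by omega), if_pos hqL]
    simp only [Option.map_some, Function.comp_apply, Int.toNat_zero, zero_add]
    congr 1
    -- goal: inner gather sum at q = pvContrib (x.take n.toNat) (y.take m.toNat) 0 q
    by_cases hn : 0 < n
    · by_cases hm : 0 < m
      · have hbounds : n ≤ (x.length : Int) ∧ m ≤ (y.length : Int) := by
          rcases hpre with h | h | h
          · omega
          · omega
          · exact h
        exact pvInnerSum_eq x y n m q hn hm hbounds.1 hbounds.2 (by omega)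
      · -- m ≤ 0 : gather window empty, ys empty
        have hys : y.take m.toNat = [] := by
          have : m.toNat = 0 := by omega
          simp [this]
        rw [hys, pvContrib_ys_nil]
        rw [PySem.List.pyRange_one_eq_nil (by omega)]
        rfl
    · -- n ≤ 0 : gather window empty, xs empty
      have hxs : x.take n.toNat = [] := by
        have : n.toNat = 0 := by omega
        simp [this]
      rw [hxs]
      rw [PySem.List.pyRange_one_eq_nil (by omega)]
      rfl
  · have hnone : (List.range (n + m - 1 - 0).toNat)[q]? = none := by
      rw [List.getElem?_eq_none_iff]
      simp only [List.length_range]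
      omega
    rw [hnone, if_neg hqL]
    rfl
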